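-- pv_equiv track=rewrite | github.com/miliar/Code_Jam_Webscraper | Solutions_in_python/Problem_7/crop.py | treesCoord
-- ===== SOURCE A (Python) =====
-- def treesCoord(n, A, B, C, D, M, x0, y0):
-- 	X = x0
-- 	Y = y0
-- 	ret = []
-- 	ret.append((X,Y))
--
-- 	for i in range(1, n):
-- 		X = (A * X + B) % M
-- 		Y = (C * Y + D) % M
-- 		ret.append((X,Y))
--
-- #	print ret
-- 	return ret
-- ===== SOURCE B (Python) =====
-- def _lcg_seq(mult, add, mod, seed, k):
--     """seed followed by k LCG steps."""
--     seq = [seed]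
--     for _ in range(k):
--         seed = (mult * seed + add) % mod
--         seq.append(seed)
--     return seq
--
-- def treesCoord(n, A, B, C, D, M, x0, y0):
--     k = max(n - 1, 0)
--     xs = _lcg_seq(A, B, M, x0, k)
--     ys = _lcg_seq(C, D, M, y0, k)
--     return list(zip(xs, ys))
-- ===== Notes on version B (the rewrite author's own statement) =====
-- stated objective: alternative
-- what changed: Generates the X and Y linear-congruential sequences independently (each as a recursively built list) and zips them, instead of one loop interleaving both updates and appending pairs.
import Mathlib
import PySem

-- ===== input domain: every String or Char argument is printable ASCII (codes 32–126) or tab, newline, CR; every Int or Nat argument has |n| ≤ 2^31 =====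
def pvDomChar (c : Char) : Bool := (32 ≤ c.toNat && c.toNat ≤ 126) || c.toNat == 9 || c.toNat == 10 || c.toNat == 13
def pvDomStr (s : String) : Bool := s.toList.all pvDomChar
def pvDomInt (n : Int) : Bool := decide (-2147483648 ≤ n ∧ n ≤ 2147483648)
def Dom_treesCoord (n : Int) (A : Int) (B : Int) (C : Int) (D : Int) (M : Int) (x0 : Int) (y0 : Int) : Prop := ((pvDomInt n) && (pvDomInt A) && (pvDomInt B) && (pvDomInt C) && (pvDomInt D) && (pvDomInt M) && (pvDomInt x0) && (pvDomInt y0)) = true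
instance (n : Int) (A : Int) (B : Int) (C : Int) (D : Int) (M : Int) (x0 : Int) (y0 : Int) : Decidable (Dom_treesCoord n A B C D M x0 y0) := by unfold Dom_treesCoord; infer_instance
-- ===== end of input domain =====

-- B generates the X and Y LCG sequences independently and zips them instead of A's single interleaved loop; objective: alternative decomposition (same cost).

-- ===== PORT A =====
-- one interleaved loop over range(1, n), state (X, Y, ret)
def treesCoord (n : Int) (A : Int) (B : Int) (C : Int) (D : Int) (M : Int) (x0 : Int) (y0 : Int) : List (Int × Int) :=
  ((PySem.List.pyRange 1 n 1).foldl
    (fun (s : Int × Int × List (Int × Int)) _ =>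
      let X := PySem.Int.mod (A * s.1 + B) M
      let Y := PySem.Int.mod (C * s.2.1 + D) M
      (X, Y, s.2.2 ++ [(X, Y)]))
    (x0, y0, [(x0, y0)])).2.2

-- ===== PORT B =====
-- helper _lcg_seq from Source B: seed followed by k LCG steps, built by a loop over range(k)
def lcgSeq (mult add «mod» seed : Int) (k : Nat) : List Int :=
  ((List.range k).foldl
    (fun (s : Int × List Int) _ =>
      let t := PySem.Int.mod (mult * s.1 + add) «mod»
      (t, s.2 ++ [t]))
    (seed, [seed])).2

-- max(n-1, 0) is (n-1).toNat
def treesCoord_alt (n : Int) (A : Int) (B : Int) (C : Int) (D : Int) (M : Int) (x0 : Int) (y0 : Int) : List (Int × Int) :=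
  List.zip (lcgSeq A B M x0 (n - 1).toNat) (lcgSeq C D M y0 (n - 1).toNat)

-- ===== PRECONDITION & SPEC =====
-- Pre_ excludes M = 0 with n ≥ 2, where the Python A (and B) raise ZeroDivisionError on '% M'.
def Pre_treesCoord (n : Int) (A : Int) (B : Int) (C : Int) (D : Int) (M : Int) (x0 : Int) (y0 : Int) : Prop := M ≠ 0 ∨ n ≤ 1
instance (n : Int) (A : Int) (B : Int) (C : Int) (D : Int) (M : Int) (x0 : Int) (y0 : Int) : Decidable (Pre_treesCoord n A B C D M x0 y0) := by unfold Pre_treesCoord; infer_instance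

def pvWitness_treesCoord : Int × Int × Int × Int × Int × Int × Int × Int := (5, 3, 1, 2, 4, 7, 6, 0)

def Spec_treesCoord (n : Int) (A : Int) (B : Int) (C : Int) (D : Int) (M : Int) (x0 : Int) (y0 : Int) (out : List (Int × Int)) : Prop := out = treesCoord_alt n A B C D M x0 y0
instance (n : Int) (A : Int) (B : Int) (C : Int) (D : Int) (M : Int) (x0 : Int) (y0 : Int) (out : List (Int × Int)) : Decidable (Spec_treesCoord n A B C D M x0 y0 out) := by unfold Spec_treesCoord; infer_instance

-- ===== CLAIM (what is proved, stated in full; the proofs are below) =====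
def Claim_equal_treesCoord : Prop := ∀ (n : Int) (A : Int) (B : Int) (C : Int) (D : Int) (M : Int) (x0 : Int) (y0 : Int), Dom_treesCoord n A B C D M x0 y0 → Pre_treesCoord n A B C D M x0 y0 → Spec_treesCoord n A B C D M x0 y0 (treesCoord n A B C D M x0 y0)

-- ===== LEMMAS AND PROOFS =====

-- recursive characterisation of lcgSeq, used by the proofs only
def lcgRec (mult add «mod» seed : Int) (k : Nat) : List Int :=
  match k with
  | 0 => [seed]
  | k + 1 => seed :: lcgRec mult add «mod» (PySem.Int.mod (mult * seed + add) «mod») k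

-- the body of A's foldl ignores the range element, so the fold is iteration of one step
theorem foldl_const_step {σ : Type} {α : Type} (f : σ → σ) (l : List α) (s : σ) :
    l.foldl (fun a _ => f a) s = f^[l.length] s := by
  induction l generalizing s with
  | nil => rfl
  | cons x xs ih => simp [List.foldl, ih, Function.iterate_succ_apply]

theorem lcgSeq_step_invariant (mult add «mod» : Int) (k : Nat) :
    ∀ (seed : Int) (pre : List Int),
    ((fun (s : Int × List Int) =>
        let t := PySem.Int.mod (mult * s.1 + add) «mod»
        (t, s.2 ++ [t]))^[k] (seed, pre ++ [seed])).2 = pre ++ lcgRec mult add «mod» seed k := by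
  induction k with
  | zero => intro seed pre; simp [lcgRec]
  | succ k ih =>
    intro seed pre
    rw [Function.iterate_succ_apply]
    have h := ih (PySem.Int.mod (mult * seed + add) «mod») (pre ++ [seed])
    simp only [List.append_assoc] at h
    simpa [lcgRec] using h

theorem lcgSeq_eq_lcgRec (mult add «mod» seed : Int) (k : Nat) :
    lcgSeq mult add «mod» seed k = lcgRec mult add «mod» seed k := by
  unfold lcgSeq
  rw [foldl_const_step]
  have h := lcgSeq_step_invariant mult add «mod» k seed []
  simpa using h

-- invariant of A's loop: after k steps the accumulated list is acc ++ zip of the two sequences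
theorem loop_invariant (A B C D M : Int) (k : Nat) :
    ∀ (x y : Int) (acc : List (Int × Int)),
    ((fun (s : Int × Int × List (Int × Int)) =>
        let X := PySem.Int.mod (A * s.1 + B) M
        let Y := PySem.Int.mod (C * s.2.1 + D) M
        (X, Y, s.2.2 ++ [(X, Y)]))^[k] (x, y, acc ++ [(x, y)])).2.2
      = acc ++ List.zip (lcgRec A B M x k) (lcgRec C D M y k) := by
  induction k with
  | zero => intro x y acc; simp [lcgRec]
  | succ k ih =>
    intro x y acc
    rw [Function.iterate_succ_apply]
    have h := ih (PySem.Int.mod (A * x + B) M) (PySem.Int.mod (C * y + D) M) (acc ++ [(x, y)])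
    simp only [List.append_assoc] at h
    simpa [lcgRec, List.zip] using h

-- ===== VERDICT (by name: the statement is the Claim_ definition above) =====
theorem treesCoord_spec : Claim_equal_treesCoord := by
  intro n A B C D M x0 y0 _ _
  unfold Spec_treesCoord treesCoord treesCoord_alt
  rw [foldl_const_step, PySem.List.length_pyRange_one]
  have h := loop_invariant A B C D M (n - 1).toNat x0 y0 []
  simpa [lcgSeq_eq_lcgRec] using h
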